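-- pv_equiv track=rewrite | github.com/wyooyw/PolyCIM | polycim/utils/utils.py | convert_index_set_to_bitmap
-- ===== SOURCE A (Python) =====
-- def convert_index_set_to_bitmap(output_index_set, weight_index_set, feature_index_set):
--     bitmap = dict()
--     for index in feature_index_set.union(weight_index_set).union(output_index_set):
--         bitmap[index] = [0, 0, 0]
--     for index in output_index_set:
--         bitmap[index][0] = 1
--     for index in weight_index_set:
--         bitmap[index][1] = 1
--     for index in feature_index_set:
--         bitmap[index][2] = 1
--     return bitmap
-- ===== SOURCE B (Python) =====
-- def convert_index_set_to_bitmap(output_index_set, weight_index_set, feature_index_set):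
--     return {
--         index: [int(index in output_index_set),
--                 int(index in weight_index_set),
--                 int(index in feature_index_set)]
--         for index in feature_index_set.union(weight_index_set).union(output_index_set)
--     }
-- ===== Notes on version B (the rewrite author's own statement) =====
-- stated objective: simpler
-- what changed: A initializes every key to [0,0,0] and then runs three separate marking loops that mutate list entries in place; B makes a single pass over the same union, assigning each index its complete bitmap triple at once via three membership tests, with no initialization pass and no mutation.
import Mathlib
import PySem

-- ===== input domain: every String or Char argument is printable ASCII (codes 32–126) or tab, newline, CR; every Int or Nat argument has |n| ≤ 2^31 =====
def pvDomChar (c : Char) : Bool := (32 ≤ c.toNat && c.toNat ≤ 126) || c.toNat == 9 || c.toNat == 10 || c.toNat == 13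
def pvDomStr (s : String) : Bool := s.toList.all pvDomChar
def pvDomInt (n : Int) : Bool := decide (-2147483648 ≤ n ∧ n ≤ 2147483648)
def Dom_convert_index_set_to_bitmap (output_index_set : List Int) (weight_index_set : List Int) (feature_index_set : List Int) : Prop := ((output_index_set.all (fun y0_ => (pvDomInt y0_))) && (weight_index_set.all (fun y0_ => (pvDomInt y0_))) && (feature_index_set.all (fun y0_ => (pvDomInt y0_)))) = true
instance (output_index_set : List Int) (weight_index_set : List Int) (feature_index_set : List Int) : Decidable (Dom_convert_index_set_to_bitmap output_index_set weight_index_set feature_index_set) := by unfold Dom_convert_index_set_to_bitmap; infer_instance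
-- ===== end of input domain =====

-- B replaces A's init-to-[0,0,0] pass plus three in-place marking loops by a single pass over
-- the same union that assigns each index its full triple via three membership tests (objective: simpler).

-- ===== PORT A =====
def convert_index_set_to_bitmap (output_index_set : List Int) (weight_index_set : List Int) (feature_index_set : List Int) : List (Int × List Int) :=
  -- bitmap = dict(); for index in feature.union(weight).union(output): bitmap[index] = [0,0,0]
  let u : PySem.Set Int := PySem.Set.union (PySem.Set.union feature_index_set weight_index_set) output_index_set
  let bitmap : PySem.Dict Int (List Int) := u.foldl (fun d i => d.insert i [0, 0, 0]) PySem.Dict.empty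
  -- for index in output_index_set: bitmap[index][0] = 1   (key always present; Dict.modify is the total form)
  let bitmap := output_index_set.foldl (fun d i => d.modify i [] (fun v => PySem.List.pySetD v 0 1)) bitmap
  let bitmap := weight_index_set.foldl (fun d i => d.modify i [] (fun v => PySem.List.pySetD v 1 1)) bitmap
  let bitmap := feature_index_set.foldl (fun d i => d.modify i [] (fun v => PySem.List.pySetD v 2 1)) bitmap
  bitmap.items

-- ===== PORT B =====
def convert_index_set_to_bitmap_alt (output_index_set : List Int) (weight_index_set : List Int) (feature_index_set : List Int) : List (Int × List Int) :=
  (PySem.Set.union (PySem.Set.union feature_index_set weight_index_set) output_index_set).map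
    (fun i => (i, [if i ∈ output_index_set then (1 : Int) else 0,
                   if i ∈ weight_index_set then 1 else 0,
                   if i ∈ feature_index_set then 1 else 0]))

-- ===== PRECONDITION & SPEC =====
-- The three arguments are Python SETS; Pre_ states exactly that set invariant (no duplicate
-- elements in the lists modelling them) — it excludes nothing a Python caller can pass.
def Pre_convert_index_set_to_bitmap (output_index_set : List Int) (weight_index_set : List Int) (feature_index_set : List Int) : Prop :=
  output_index_set.Nodup ∧ weight_index_set.Nodup ∧ feature_index_set.Nodup
instance (output_index_set : List Int) (weight_index_set : List Int) (feature_index_set : List Int) : Decidable (Pre_convert_index_set_to_bitmap output_index_set weight_index_set feature_index_set) := by unfold Pre_convert_index_set_to_bitmap; infer_instance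
def pvWitness_convert_index_set_to_bitmap : List Int × List Int × List Int := ([1, 2], [2, 3], [3, 4])

def Spec_convert_index_set_to_bitmap (output_index_set : List Int) (weight_index_set : List Int) (feature_index_set : List Int) (out : List (Int × List Int)) : Prop := out = convert_index_set_to_bitmap_alt output_index_set weight_index_set feature_index_set
instance (output_index_set : List Int) (weight_index_set : List Int) (feature_index_set : List Int) (out : List (Int × List Int)) : Decidable (Spec_convert_index_set_to_bitmap output_index_set weight_index_set feature_index_set out) := by unfold Spec_convert_index_set_to_bitmap; infer_instance

-- ===== CLAIM (what is proved, stated in full; the proofs are below) =====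
def Claim_equal_convert_index_set_to_bitmap : Prop := ∀ (output_index_set : List Int) (weight_index_set : List Int) (feature_index_set : List Int), Dom_convert_index_set_to_bitmap output_index_set weight_index_set feature_index_set → Pre_convert_index_set_to_bitmap output_index_set weight_index_set feature_index_set → Spec_convert_index_set_to_bitmap output_index_set weight_index_set feature_index_set (convert_index_set_to_bitmap output_index_set weight_index_set feature_index_set)

-- ===== LEMMAS AND PROOFS =====

-- Building the dict by inserting fresh keys appends them in order.
theorem pv_build_items (u : List Int) (d : PySem.Dict Int (List Int))
    (hfresh : ∀ i ∈ u, d.contains i = false) (hu : u.Nodup) :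
    (u.foldl (fun d i => d.insert i [0, 0, 0]) d).items
      = d.items ++ u.map (fun i => (i, ([0, 0, 0] : List Int))) := by
  induction u generalizing d with
  | nil => simp
  | cons a rest ih =>
    simp only [List.foldl_cons, List.map_cons]
    rw [ih]
    · have hca : d.contains a = false := hfresh a (by simp)
      simp [PySem.Dict.insert, hca]
    · intro i hi
      rw [PySem.Dict.contains_insert]
      have : i ≠ a := by rintro rfl; exact (List.nodup_cons.mp hu).1 hi
      simp [this, hfresh i (List.mem_cons_of_mem _ hi)]
    · exact (List.nodup_cons.mp hu).2

-- One Dict.modify on a dict of the shape u.map (i, fv i), where the key occurs in u.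
theorem pv_modify_map (u : List Int) (fv : Int → List Int) (a : Int) (ha : a ∈ u)
    (dflt : List Int) (g : List Int → List Int) :
    PySem.Dict.modify (PySem.Dict.mk (u.map (fun i => (i, fv i)))) a dflt g
      = PySem.Dict.mk (u.map (fun i => (i, if i = a then g (fv i) else fv i))) := by
  have hget : (PySem.Dict.mk (u.map (fun i => (i, fv i)))).getD a dflt = fv a := by
    induction u with
    | nil => cases ha
    | cons b rest ih =>
      by_cases hba : b = a
      · subst hba; simp [PySem.Dict.getD, PySem.Dict.get?]
      · have ha' : a ∈ rest := by
          rcases List.mem_cons.mp ha with h | h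
          · exact absurd h.symm hba
          · exact h
        have hrec := ih ha'
        simp only [PySem.Dict.getD, PySem.Dict.get?, List.map_cons, List.find?_cons] at hrec ⊢
        have hb : (b == a) = false := by simp [hba]
        simp only [hb]
        exact hrec
  have hcon : (PySem.Dict.mk (u.map (fun i => (i, fv i)))).contains a = true := by
    simp only [PySem.Dict.contains, List.any_eq_true]
    exact ⟨(a, fv a), List.mem_map_of_mem ha, by simp⟩
  simp only [PySem.Dict.modify, PySem.Dict.insert, hcon, hget, if_true]
  congr 1
  simp only [List.map_map]
  apply List.map_congr_left
  intro i _
  by_cases hia : i = a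
  · subst hia; simp
  · simp [hia]

-- A whole marking pass: each key in l (all present in u, l duplicate-free) gets g applied.
theorem pv_pass (l : List Int) (u : List Int) (fv : Int → List Int)
    (dflt : List Int) (g : List Int → List Int)
    (hl : l.Nodup) (hsub : ∀ a ∈ l, a ∈ u) :
    l.foldl (fun d a => d.modify a dflt g) (PySem.Dict.mk (u.map (fun i => (i, fv i))))
      = PySem.Dict.mk (u.map (fun i => (i, if i ∈ l then g (fv i) else fv i))) := by
  induction l generalizing fv with
  | nil => simp
  | cons a rest ih =>
    simp only [List.foldl_cons]
    rw [pv_modify_map u fv a (hsub a (by simp)) dflt g]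
    rw [ih (fun i => if i = a then g (fv i) else fv i) (List.nodup_cons.mp hl).2
        (fun b hb => hsub b (List.mem_cons_of_mem _ hb))]
    congr 1
    apply List.map_congr_left
    intro i _
    have hanr : a ∉ rest := (List.nodup_cons.mp hl).1
    by_cases hia : i = a
    · subst hia; simp [hanr]
    · simp [hia, List.mem_cons]

-- ===== VERDICT (by name: the statement is the Claim_ definition above) =====
theorem convert_index_set_to_bitmap_spec : Claim_equal_convert_index_set_to_bitmap := by
  intro o w f _ hpre
  obtain ⟨ho, hw, hf⟩ := hpre
  unfold Spec_convert_index_set_to_bitmap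
  simp only [convert_index_set_to_bitmap, convert_index_set_to_bitmap_alt]
  set u : List Int := PySem.Set.union (PySem.Set.union f w) o with hu_def
  have hun : u.Nodup := PySem.Set.nodup_union _ _ (PySem.Set.nodup_union _ _ hf)
  have hmemo : ∀ a ∈ o, a ∈ u := by
    intro a ha; rw [hu_def]; unfold PySem.Set.union
    exact (PySem.Set.mem_update _ _ _).mpr (Or.inr ha)
  have hmemw : ∀ a ∈ w, a ∈ u := by
    intro a ha; rw [hu_def]; unfold PySem.Set.union
    exact (PySem.Set.mem_update _ _ _).mpr (Or.inl ((PySem.Set.mem_update _ _ _).mpr (Or.inr ha)))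
  have hmemf : ∀ a ∈ f, a ∈ u := by
    intro a ha; rw [hu_def]; unfold PySem.Set.union
    exact (PySem.Set.mem_update _ _ _).mpr (Or.inl ((PySem.Set.mem_update _ _ _).mpr (Or.inl ha)))
  have hbuild : u.foldl (fun d i => d.insert i [0, 0, 0]) PySem.Dict.empty
      = PySem.Dict.mk (u.map (fun i => (i, ([0, 0, 0] : List Int)))) := by
    apply PySem.Dict.ext
    rw [pv_build_items u PySem.Dict.empty (fun i _ => rfl) hun]
    rfl
  rw [hbuild,
    pv_pass o u _ [] (fun v => PySem.List.pySetD v 0 1) ho hmemo,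
    pv_pass w u _ [] (fun v => PySem.List.pySetD v 1 1) hw hmemw,
    pv_pass f u _ [] (fun v => PySem.List.pySetD v 2 1) hf hmemf]
  apply List.map_congr_left
  intro i _
  by_cases hio : i ∈ o <;> by_cases hiw : i ∈ w <;> by_cases hif : i ∈ f <;>
    simp [hio, hiw, hif, PySem.List.pySetD, PySem.List.pySet?] <;> decide
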